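-- pv_equiv track=rewrite | github.com/yondel69/UPLB-CMSC-12-Exercises | cmsc12 dumps/UPD CS11 - Prac 0n - Pataas at Pababa.py | largest_bitonic_at_most
-- ===== SOURCE A (Python) =====
-- def bitonic(s):
--     n_len = len(s)
--     for peak in range(n_len): #check non-decreasing from start to peak
--         non_decreasing = True
--         for i in range(peak):
--             if s[i] > s[i+1]:
--                 non_decreasing = False
--                 break
--         if not non_decreasing: #check non-increasing from peak to end
--             continue
--         non_increasing = True
--         for i in range(peak, n_len-1):
--             if s[i] < s[i+1]:
--                 non_increasing = False
--                 break
--         if non_increasing: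
--             return True
--     return False
--
-- def largest_bitonic_at_most(n):
--     s = str(n)
--     if bitonic(s):
--         return n #small n (n < 10000) iterate downwards
--     if n < 10000:
--         candidate = n - 1
--         while candidate >= 0:
--             if bitonic(str(candidate)):
--                 return candidate
--             candidate -= 1
--     else: #placeholder returns 0 for large n to avoid inf loop
--         return 0
-- ===== SOURCE B (Python) =====
-- def bitonic(s):
--     # single linear sweep: climb while non-decreasing, then descend; bitonic iff the sweep ends at the last index
--     i = 0
--     n = len(s)
--     while i + 1 < n and s[i] <= s[i + 1]:
--         i += 1
--     while i + 1 < n and s[i] >= s[i + 1]: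
--         i += 1
--     return i == n - 1
--
-- def largest_bitonic_at_most(n):
--     if bitonic(str(n)):
--         return n
--     if n < 10000:
--         for c in range(n - 1, -1, -1):
--             if bitonic(str(c)):
--                 return c
--     else:
--         return 0
-- ===== Notes on version B (the rewrite author's own statement) =====
-- stated objective: simpler
-- what changed: bitonic(s) is recomputed as one linear climb-then-descend sweep over the string instead of trying every peak with nested loops, and the downward search becomes a first-match over a descending range.
import Mathlib
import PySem

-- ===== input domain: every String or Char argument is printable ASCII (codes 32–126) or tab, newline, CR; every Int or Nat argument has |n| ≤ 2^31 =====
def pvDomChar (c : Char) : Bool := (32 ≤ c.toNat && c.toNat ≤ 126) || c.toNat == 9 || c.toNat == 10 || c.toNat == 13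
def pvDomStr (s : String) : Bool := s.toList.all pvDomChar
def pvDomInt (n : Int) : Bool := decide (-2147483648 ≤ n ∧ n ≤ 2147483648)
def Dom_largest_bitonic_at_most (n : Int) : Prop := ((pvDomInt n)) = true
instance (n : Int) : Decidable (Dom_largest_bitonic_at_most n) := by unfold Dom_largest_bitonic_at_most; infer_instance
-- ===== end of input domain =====

-- B replaces A's try-every-peak bitonic test (nested loops) by one linear climb-then-descend sweep
-- (and the downward candidate scan by a first-match over a descending range): simpler, same results.


-- ===== PORT A =====
-- A's bitonic: for each peak in range(len s), check non-decreasing before the peak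
-- (inner loop with break = List.all over range peak) and, if so, non-increasing from
-- the peak to the end (loop over range(peak, n-1) = List.range' peak (n-1-peak));
-- return True on the first peak passing both (any = first-success return).
def bitonicA (s : String) : Bool :=
  let l := s.toList
  let n_len := l.length
  (List.range n_len).any fun peak =>
    if (List.range peak).all (fun i => !(l.getD (i+1) ' ' < l.getD i ' ')) then
      (List.range' peak (n_len - 1 - peak)).all (fun i => !(l.getD i ' ' < l.getD (i+1) ' '))
    else false

-- A's while loop: candidate counts down from n-1; the loop only ever sees candidate ≥ 0,
-- so it is structural recursion on the Nat value. The value at the fall-through (k = 0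
-- not bitonic) corresponds to Python returning None; it is unreachable since "0" is bitonic.
def scanA : Nat → Int
  | 0 => if bitonicA (PySem.Int.toStr ((0 : Nat) : Int)) then 0 else 0
  | Nat.succ k' =>
    if bitonicA (PySem.Int.toStr ((k' + 1 : Nat) : Int)) then ((k' + 1 : Nat) : Int)
    else scanA k'

def largest_bitonic_at_most (n : Int) : Int :=
  if bitonicA (PySem.Int.toStr n) then n
  else if n < 10000 then
    -- Python: candidate = n-1; while candidate >= 0: … ; if the loop is skipped (n-1 < 0)
    -- Python returns None — outside Pre_; 0 here stands for that unclaimed branch.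
    if 0 ≤ n - 1 then scanA (n - 1).toNat else 0
  else 0

-- ===== PORT B =====
-- B's bitonic: phase 1 climbs while s[i] <= s[i+1], phase 2 descends while s[i] >= s[i+1];
-- each while loop is recursion on the remaining length.
def phaseUp (l : List Char) (i : Nat) : Nat :=
  if i + 1 < l.length ∧ l.getD i ' ' ≤ l.getD (i+1) ' ' then phaseUp l (i+1) else i
termination_by l.length - i
decreasing_by omega

def phaseDown (l : List Char) (i : Nat) : Nat :=
  if i + 1 < l.length ∧ l.getD (i+1) ' ' ≤ l.getD i ' ' then phaseDown l (i+1) else i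
termination_by l.length - i
decreasing_by omega

def bitonicB (s : String) : Bool :=
  let l := s.toList
  let i := phaseDown l (phaseUp l 0)
  decide ((i : Int) = (l.length : Int) - 1)

def largest_bitonic_at_most_alt (n : Int) : Int :=
  if bitonicB (PySem.Int.toStr n) then n
  else if n < 10000 then
    -- for c in range(n-1, -1, -1): return the first bitonic c (None fall-through is outside Pre_)
    ((PySem.List.pyRange (n - 1) (-1) (-1)).find? (fun c => bitonicB (PySem.Int.toStr c))).getD 0
  else 0

-- ===== PRECONDITION & SPEC =====
-- the shared characterisation: p is a valid peak (non-decreasing before it, non-increasing after)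
def GoodPeak (l : List Char) (p : Nat) : Prop :=
  (∀ i, i < p → l.getD i ' ' ≤ l.getD (i+1) ' ') ∧
  (∀ k, k < l.length → p ≤ k → k + 1 < l.length → l.getD (k+1) ' ' ≤ l.getD k ' ')

-- Pre_ excludes exactly the negative n whose digit string str(n) is not bitonic (no valid peak):
-- there A's downward while loop is skipped and A falls through returning None (not an int); B does the same.
def Pre_largest_bitonic_at_most (n : Int) : Prop :=
  0 ≤ n ∨ ∃ p, p < (PySem.Int.toChars n).length ∧ GoodPeak (PySem.Int.toChars n) p
instance (n : Int) : Decidable (Pre_largest_bitonic_at_most n) := by unfold Pre_largest_bitonic_at_most GoodPeak; infer_instance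
def pvWitness_largest_bitonic_at_most : Int := 42

def Spec_largest_bitonic_at_most (n : Int) (out : Int) : Prop := out = largest_bitonic_at_most_alt n
instance (n : Int) (out : Int) : Decidable (Spec_largest_bitonic_at_most n out) := by unfold Spec_largest_bitonic_at_most; infer_instance

-- ===== CLAIM (what is proved, stated in full; the proofs are below) =====
def Claim_equal_largest_bitonic_at_most : Prop := ∀ (n : Int), Dom_largest_bitonic_at_most n → Pre_largest_bitonic_at_most n → Spec_largest_bitonic_at_most n (largest_bitonic_at_most n)


-- ===== LEMMAS AND PROOFS =====

theorem bitonicA_iff (s : String) :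
    bitonicA s = true ↔ ∃ p, p < s.toList.length ∧ GoodPeak s.toList p := by
  unfold bitonicA GoodPeak
  simp only [List.any_eq_true, List.mem_range, List.all_eq_true, List.mem_range'_1,
    Bool.if_false_right, Bool.and_eq_true, Bool.not_eq_eq_eq_not, Bool.not_true,
    decide_eq_false_iff_not, not_lt, decide_eq_true_eq]
  constructor
  · rintro ⟨p, hp, h1, h2⟩
    exact ⟨p, hp, fun i hi => h1 i hi, fun k _ hk hk1 => h2 k ⟨hk, by omega⟩⟩
  · rintro ⟨p, hp, h1, h2⟩
    exact ⟨p, hp, fun i hi => h1 i hi, fun k ⟨hk, hk'⟩ => h2 k (by omega) hk (by omega)⟩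

theorem phaseUp_lt (l : List Char) (i : Nat) (h : i < l.length) : phaseUp l i < l.length := by
  induction i using phaseUp.induct (l := l) with
  | case1 i hc ih => rw [phaseUp, if_pos hc]; exact ih (by omega)
  | case2 i hc => rw [phaseUp, if_neg hc]; exact h

theorem phaseUp_asc (l : List Char) (i : Nat) :
    ∀ k, i ≤ k → k < phaseUp l i → l.getD k ' ' ≤ l.getD (k+1) ' ' := by
  induction i using phaseUp.induct (l := l) with
  | case1 i hc ih =>
    intro k hk hk'
    rw [phaseUp, if_pos hc] at hk'
    rcases Nat.eq_or_lt_of_le hk with rfl | hlt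
    · exact hc.2
    · exact ih k hlt hk'
  | case2 i hc =>
    intro k hk hk'
    rw [phaseUp, if_neg hc] at hk'
    omega

theorem phaseUp_stop (l : List Char) (i : Nat) (h : phaseUp l i + 1 < l.length) :
    ¬ l.getD (phaseUp l i) ' ' ≤ l.getD (phaseUp l i + 1) ' ' := by
  induction i using phaseUp.induct (l := l) with
  | case1 i hc ih => rw [phaseUp, if_pos hc] at h ⊢; exact ih h
  | case2 i hc =>
    rw [phaseUp, if_neg hc] at h ⊢
    intro hle
    exact hc ⟨h, hle⟩

theorem phaseDown_lt (l : List Char) (i : Nat) (h : i < l.length) : phaseDown l i < l.length := by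
  induction i using phaseDown.induct (l := l) with
  | case1 i hc ih => rw [phaseDown, if_pos hc]; exact ih (by omega)
  | case2 i hc => rw [phaseDown, if_neg hc]; exact h

theorem phaseDown_desc (l : List Char) (i : Nat) :
    ∀ k, i ≤ k → k < phaseDown l i → l.getD (k+1) ' ' ≤ l.getD k ' ' := by
  induction i using phaseDown.induct (l := l) with
  | case1 i hc ih =>
    intro k hk hk'
    rw [phaseDown, if_pos hc] at hk'
    rcases Nat.eq_or_lt_of_le hk with rfl | hlt
    · exact hc.2
    · exact ih k hlt hk'
  | case2 i hc =>
    intro k hk hk'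
    rw [phaseDown, if_neg hc] at hk'
    omega

theorem phaseDown_reach (l : List Char) (i : Nat) (hi : i < l.length)
    (h : ∀ k, i ≤ k → k + 1 < l.length → l.getD (k+1) ' ' ≤ l.getD k ' ') :
    phaseDown l i = l.length - 1 := by
  induction i using phaseDown.induct (l := l) with
  | case1 i hc ih =>
    rw [phaseDown, if_pos hc]
    exact ih (by omega) (fun k hk hk' => h k (by omega) hk')
  | case2 i hc =>
    rw [phaseDown, if_neg hc]
    by_cases hlen : i + 1 < l.length
    · exact absurd ⟨hlen, h i le_rfl hlen⟩ hc
    · omega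

theorem bitonicB_iff (s : String) :
    bitonicB s = true ↔ ∃ p, p < s.toList.length ∧ GoodPeak s.toList p := by
  unfold bitonicB
  set l := s.toList with hl
  simp only [decide_eq_true_eq]
  constructor
  · intro h
    have hn : 0 < l.length := by
      by_contra hn
      have h0 : l.length = 0 := by omega
      rw [phaseUp, phaseDown] at h
      simp [h0] at h
    set i1 := phaseUp l 0 with hi1
    set i2 := phaseDown l i1 with hi2
    have hi2v : i2 = l.length - 1 := by
      have := phaseDown_lt l i1 (phaseUp_lt l 0 hn)
      omega
    refine ⟨i1, by have := phaseUp_lt l 0 hn; omega, fun i hi => phaseUp_asc l 0 i (by omega) hi, ?_⟩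
    intro k _ hk hk1
    exact phaseDown_desc l i1 k hk (by omega)
  · rintro ⟨p, hp, h1, h2⟩
    have hn : 0 < l.length := by omega
    set i1 := phaseUp l 0 with hi1
    have hi1lt : i1 < l.length := phaseUp_lt l 0 hn
    -- the climb cannot stop strictly before p: the stop condition would contradict h1
    have hpi1 : p ≤ i1 := by
      by_contra hlt
      have hstop := phaseUp_stop l 0 (by omega)
      exact hstop (h1 i1 (by omega))
    have hreach : phaseDown l i1 = l.length - 1 :=
      phaseDown_reach l i1 hi1lt (fun k hk hk' => h2 k (by omega) (by omega) hk')
    rw [hreach]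
    omega

theorem bitonic_eq (s : String) : bitonicA s = bitonicB s := by
  cases hA : bitonicA s <;> cases hB : bitonicB s <;> try rfl
  · exact absurd ((bitonicA_iff s).mpr ((bitonicB_iff s).mp hB)) (by simp [hA])
  · exact absurd ((bitonicB_iff s).mpr ((bitonicA_iff s).mp hA)) (by simp [hB])

theorem scan_eq (k : Nat) :
    ((PySem.List.pyRange ((k : Int)) (-1) (-1)).find? (fun c => bitonicB (PySem.Int.toStr c))).getD 0
      = scanA k := by
  induction k with
  | zero =>
    rw [PySem.List.pyRange_neg_one_cons (by norm_num), PySem.List.pyRange_neg_one_eq_nil (by norm_num),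
      scanA]
    push_cast
    cases h : bitonicB (PySem.Int.toStr (0 : Int)) with
    | false =>
      rw [List.find?_cons_of_neg (by simp [h]), bitonic_eq]
      simp [h]
    | true =>
      rw [List.find?_cons_of_pos (by simp [h]), bitonic_eq]
      simp [h]
  | succ k ih =>
    rw [PySem.List.pyRange_neg_one_cons (by omega), scanA]
    push_cast
    have hcast : ((k : Int) + 1) - 1 = (k : Int) := by ring
    rw [hcast]
    cases h : bitonicB (PySem.Int.toStr ((k : Int) + 1)) with
    | false =>
      rw [List.find?_cons_of_neg (by simp [h]), bitonic_eq]
      simp only [h, Bool.false_eq_true, if_false]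
      exact ih
    | true =>
      rw [List.find?_cons_of_pos (by simp [h]), bitonic_eq]
      simp [h]

-- ===== VERDICT (by name: the statement is the Claim_ definition above) =====
theorem largest_bitonic_at_most_spec : Claim_equal_largest_bitonic_at_most := by
  intro n _ hn
  unfold Pre_largest_bitonic_at_most at hn
  unfold Spec_largest_bitonic_at_most largest_bitonic_at_most largest_bitonic_at_most_alt
  rw [← bitonic_eq]
  have hts : (PySem.Int.toStr n).toList = PySem.Int.toChars n := PySem.Int.toList_toStr n
  cases h : bitonicA (PySem.Int.toStr n)
  · have hn0 : 0 ≤ n := by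
      rcases hn with hn | hex
      · exact hn
      · have := (bitonicA_iff (PySem.Int.toStr n)).mpr (by rw [hts]; exact hex)
        simp [h] at this
    simp only [Bool.false_eq_true, if_false]
    by_cases hs : n < 10000
    · rw [if_pos hs, if_pos hs]
      by_cases h1 : 0 ≤ n - 1
      · rw [if_pos h1]
        have hk : ((n - 1).toNat : Int) = n - 1 := Int.toNat_of_nonneg h1
        conv_rhs => rw [← hk]
        exact (scan_eq (n - 1).toNat).symm
      · rw [if_neg h1]
        have hn0' : n = 0 := by omega
        subst hn0'
        rw [PySem.List.pyRange_neg_one_eq_nil (by norm_num)]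
        rfl
    · rw [if_neg hs, if_neg hs]
  · simp
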